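-- pv_equiv track=rewrite | github.com/pjlhjr/nfl-tiebreaker | load_schedules.py | get_common_games
-- ===== SOURCE A (Python) =====
-- def get_game_opponent(game, team):
--     assert team in [game['Winner'], game['Loser']]
--     return game['Winner'] if game['Winner'] != team else game['Loser']
--
-- def get_all_opponents(schedules, team):
--     return set(map(lambda game: get_game_opponent(game, team), schedules[team]))
--
-- def get_common_games(schedules, teams):
--     # First, need to get common opponents
--     common_opponents = None
--     for team in teams:
--         opponents = get_all_opponents(schedules, team)
--         if common_opponents is None:
--             common_opponents = opponents
--         else:
--             common_opponents = common_opponents.intersection(opponents)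
--
--     # Then, we'll go back and get the games
--     common_games = {}
--     for team in teams:
--         common_games[team] = [game for game in schedules[team] if get_game_opponent(game, team) in common_opponents]
--
--     return common_games
-- ===== SOURCE B (Python) =====
-- def get_common_games(schedules, teams):
--     # Count, for each opponent, how many distinct teams played it; common
--     # opponents are those whose count equals the number of distinct teams.
--     uniq = list(dict.fromkeys(teams))
--     counts = {}
--     for team in uniq:
--         opponents = dict.fromkeys(
--             g['Winner'] if g['Winner'] != team else g['Loser']
--             for g in schedules[team])
--         for opp in opponents:
--             counts[opp] = counts.get(opp, 0) + 1
--     common = set(opp for opp, c in counts.items() if c == len(uniq))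
--
--     result = {}
--     for team in teams:
--         result[team] = [g for g in schedules[team]
--                         if (g['Winner'] if g['Winner'] != team else g['Loser']) in common]
--     return result
-- ===== Notes on version B (the rewrite author's own statement) =====
-- stated objective: alternative
-- what changed: Common opponents are found with a frequency table (one counter incremented once per team over each team's deduplicated opponents, then thresholded at the number of distinct teams) instead of A's reduce-by-pairwise-set-intersection; the filtering pass is kept.
import Mathlib
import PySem

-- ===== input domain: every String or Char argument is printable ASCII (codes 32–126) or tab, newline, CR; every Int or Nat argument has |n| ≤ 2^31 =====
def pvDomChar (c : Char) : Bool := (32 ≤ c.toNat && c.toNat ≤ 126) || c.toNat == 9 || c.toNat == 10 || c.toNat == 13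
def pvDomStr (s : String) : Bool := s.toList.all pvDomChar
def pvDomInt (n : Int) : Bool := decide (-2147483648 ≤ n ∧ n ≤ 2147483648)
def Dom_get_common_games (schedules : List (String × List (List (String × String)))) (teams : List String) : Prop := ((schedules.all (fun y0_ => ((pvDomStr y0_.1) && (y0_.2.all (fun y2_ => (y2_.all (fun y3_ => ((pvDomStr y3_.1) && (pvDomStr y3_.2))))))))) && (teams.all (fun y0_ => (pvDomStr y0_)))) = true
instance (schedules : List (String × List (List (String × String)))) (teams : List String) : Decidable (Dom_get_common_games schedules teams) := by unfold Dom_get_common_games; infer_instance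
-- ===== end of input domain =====

-- B finds the common opponents with a frequency table (count each distinct team's deduplicated
-- opponents once, threshold at the number of distinct teams) instead of A's chain of set
-- intersections; the filtering pass is unchanged. Equivalence of the RETURN value is proved.

-- d[k] for a Python dict given as an association list (last value wins, as in dict(pairs));
-- with Pre_ the key is always present, so the default is never the result.
def pvLook {α : Type} (d : List (String × α)) (k : String) (dflt : α) : α :=
  PySem.Dict.getD (PySem.Dict.ofList d) k dflt

-- ===== PORT A =====
-- get_game_opponent(game, team) (the assert always passes under Pre_)
def pvOpp (g : List (String × String)) (team : String) : String :=
  if pvLook g "Winner" "" ≠ team then pvLook g "Winner" "" else pvLook g "Loser" ""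

-- get_all_opponents(schedules, team)
def pvOppSet (schedules : List (String × List (List (String × String)))) (team : String) : PySem.Set String :=
  PySem.Set.ofList ((pvLook schedules team []).map (fun g => pvOpp g team))

def get_common_games (schedules : List (String × List (List (String × String)))) (teams : List String) : List (String × List (List (String × String))) :=
  let common_opponents : Option (PySem.Set String) :=
    teams.foldl (fun acc team =>
      let opponents := pvOppSet schedules team
      match acc with
      | none => some opponents
      | some s => some (PySem.Set.inter s opponents)) none
  let common_games : PySem.Dict String (List (List (String × String))) :=
    teams.foldl (fun d team =>
      d.insert team ((pvLook schedules team []).filter (fun g =>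
        match common_opponents with
        | some s => PySem.Set.contains s (pvOpp g team)
        | none => false))) PySem.Dict.empty
  common_games.items

-- ===== PORT B =====
def get_common_games_alt (schedules : List (String × List (List (String × String)))) (teams : List String) : List (String × List (List (String × String))) :=
  let uniq := PySem.List.dedup teams
  let counts : PySem.Dict String Int :=
    uniq.foldl (fun d team =>
      (PySem.List.dedup ((pvLook schedules team []).map (fun g => pvOpp g team))).foldl
        (fun d opp => d.insert opp (d.getD opp 0 + 1)) d) PySem.Dict.empty
  let common : PySem.Set String :=
    PySem.Set.ofList ((counts.items.filter (fun p => p.2 == (uniq.length : Int))).map (fun p => p.1))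
  let result : PySem.Dict String (List (List (String × String))) :=
    teams.foldl (fun d team =>
      d.insert team ((pvLook schedules team []).filter (fun g =>
        PySem.Set.contains common (pvOpp g team)))) PySem.Dict.empty
  result.items

-- ===== PRECONDITION & SPEC =====
-- Python A raises (KeyError / AssertionError) when a team is not a key of schedules, a game
-- lacks a 'Winner' or 'Loser' key, or the team is neither; Pre_ admits exactly the other inputs.
def Pre_get_common_games (schedules : List (String × List (List (String × String)))) (teams : List String) : Prop :=
  ∀ team ∈ teams,
    (PySem.Dict.ofList schedules).contains team = true ∧
    ∀ g ∈ pvLook schedules team ([] : List (List (String × String))),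
      (PySem.Dict.ofList g).contains "Winner" = true ∧
      (PySem.Dict.ofList g).contains "Loser" = true ∧
      (team = pvLook g "Winner" "" ∨ team = pvLook g "Loser" "")
instance (schedules : List (String × List (List (String × String)))) (teams : List String) : Decidable (Pre_get_common_games schedules teams) := by unfold Pre_get_common_games; infer_instance

def pvWitness_get_common_games : (List (String × List (List (String × String)))) × List String :=
  ([("a", [[("Winner", "a"), ("Loser", "b")]]), ("b", [[("Winner", "a"), ("Loser", "b")]])], ["a", "b"])

def Spec_get_common_games (schedules : List (String × List (List (String × String)))) (teams : List String) (out : List (String × List (List (String × String)))) : Prop := out = get_common_games_alt schedules teams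
instance (schedules : List (String × List (List (String × String)))) (teams : List String) (out : List (String × List (List (String × String)))) : Decidable (Spec_get_common_games schedules teams out) := by unfold Spec_get_common_games; infer_instance

-- ===== CLAIM (what is proved, stated in full; the proofs are below) =====
def Claim_equal_get_common_games : Prop := ∀ (schedules : List (String × List (List (String × String)))) (teams : List String), Dom_get_common_games schedules teams → Pre_get_common_games schedules teams → Spec_get_common_games schedules teams (get_common_games schedules teams)

-- ===== LEMMAS AND PROOFS =====

-- A's first loop: after the first team, the Option accumulator is always 'some'.
theorem pvFoldA_some (schedules : List (String × List (List (String × String)))) (ts : List String) (s : PySem.Set String) :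
    ts.foldl (fun acc team =>
      let opponents := pvOppSet schedules team
      match acc with
      | none => some opponents
      | some s => some (PySem.Set.inter s opponents)) (some s)
    = some (ts.foldl (fun s t => PySem.Set.inter s (pvOppSet schedules t)) s) := by
  induction ts generalizing s with
  | nil => rfl
  | cons t ts ih => simp [List.foldl_cons, ih]

-- membership in the iterated intersection
theorem pvMem_interFold (schedules : List (String × List (List (String × String)))) (ts : List String) (s : PySem.Set String) (x : String) :
    x ∈ ts.foldl (fun s t => PySem.Set.inter s (pvOppSet schedules t)) s ↔
      x ∈ s ∧ ∀ t ∈ ts, x ∈ pvOppSet schedules t := by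
  induction ts generalizing s with
  | nil => simp
  | cons t ts ih =>
    simp only [List.foldl_cons, ih, PySem.Set.mem_inter, List.mem_cons]
    constructor
    · rintro ⟨⟨h1, h2⟩, h3⟩
      exact ⟨h1, fun u hu => hu.elim (fun e => e ▸ h2) (h3 u)⟩
    · rintro ⟨h1, h2⟩
      exact ⟨⟨h1, h2 t (Or.inl rfl)⟩, fun u hu => h2 u (Or.inr hu)⟩

-- B's counts: the value stored at x counts the teams whose opponent set contains x
theorem pvCounts_getD (schedules : List (String × List (List (String × String)))) (uniq : List String) (d : PySem.Dict String Int) (x : String) :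
    (uniq.foldl (fun d team =>
        (PySem.List.dedup ((pvLook schedules team []).map (fun g => pvOpp g team))).foldl
          (fun d opp => d.insert opp (d.getD opp 0 + 1)) d) d).getD x 0
    = d.getD x 0 + (uniq.countP (fun t => decide (x ∈ pvOppSet schedules t)) : Int) := by
  induction uniq generalizing d with
  | nil => simp
  | cons t ts ih =>
    simp only [List.foldl_cons, ih, PySem.Dict.getD_foldl_insert_add_one, List.countP_cons]
    have hn : (PySem.List.dedup ((pvLook schedules t []).map (fun g => pvOpp g t))).Nodup :=
      PySem.List.nodup_dedup _
    have hm : x ∈ PySem.List.dedup ((pvLook schedules t []).map (fun g => pvOpp g t)) ↔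
        x ∈ pvOppSet schedules t := by
      rw [PySem.List.mem_dedup, pvOppSet, PySem.Set.mem_ofList]
    rw [List.Nodup.count hn]
    simp only [hm]
    by_cases h : x ∈ pvOppSet schedules t
    · simp only [h, decide_true]
      push_cast
      ring
    · simp only [h, decide_false]
      push_cast
      ring

-- B's counts: key membership
theorem pvCounts_keys (schedules : List (String × List (List (String × String)))) (uniq : List String) (d : PySem.Dict String Int) (x : String) :
    x ∈ (uniq.foldl (fun d team =>
        (PySem.List.dedup ((pvLook schedules team []).map (fun g => pvOpp g team))).foldl
          (fun d opp => d.insert opp (d.getD opp 0 + 1)) d) d).keys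
    ↔ x ∈ d.keys ∨ ∃ t ∈ uniq, x ∈ pvOppSet schedules t := by
  induction uniq generalizing d with
  | nil => simp
  | cons t ts ih =>
    simp only [List.foldl_cons, ih, PySem.Dict.keys_foldl_insert, PySem.Set.mem_update,
      PySem.List.mem_dedup, List.mem_cons]
    constructor
    · rintro (((h | h) | ⟨u, hu, hx⟩))
      · exact Or.inl h
      · exact Or.inr ⟨t, Or.inl rfl, by rwa [pvOppSet, PySem.Set.mem_ofList]⟩
      · exact Or.inr ⟨u, Or.inr hu, hx⟩
    · rintro (h | ⟨u, (rfl | hu), hx⟩)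
      · exact Or.inl (Or.inl h)
      · exact Or.inl (Or.inr (by rwa [pvOppSet, PySem.Set.mem_ofList] at hx))
      · exact Or.inr ⟨u, hu, hx⟩

theorem pvCounts_nodup_keys (schedules : List (String × List (List (String × String)))) (uniq : List String) (d : PySem.Dict String Int) (h : d.keys.Nodup) :
    (uniq.foldl (fun d team =>
        (PySem.List.dedup ((pvLook schedules team []).map (fun g => pvOpp g team))).foldl
          (fun d opp => d.insert opp (d.getD opp 0 + 1)) d) d).keys.Nodup := by
  induction uniq generalizing d with
  | nil => exact h
  | cons t ts ih =>
    exact ih _ (PySem.Dict.nodup_keys_foldl_insert _ _ _ h)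

-- membership in B's 'common' set
theorem pvMem_common (schedules : List (String × List (List (String × String)))) (teams : List String) (x : String) :
    (x ∈ PySem.Set.ofList
      ((((PySem.List.dedup teams).foldl (fun d team =>
          (PySem.List.dedup ((pvLook schedules team []).map (fun g => pvOpp g team))).foldl
            (fun d opp => d.insert opp (d.getD opp 0 + 1)) d) PySem.Dict.empty).items.filter
        (fun p => p.2 == ((PySem.List.dedup teams).length : Int))).map (fun p => p.1)))
    ↔ teams ≠ [] ∧ ∀ t ∈ teams, x ∈ pvOppSet schedules t := by
  have hnd : (((PySem.List.dedup teams).foldl (fun (d : PySem.Dict String Int) team =>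
      (PySem.List.dedup ((pvLook schedules team []).map (fun g => pvOpp g team))).foldl
        (fun d opp => d.insert opp (d.getD opp 0 + 1)) d) PySem.Dict.empty)).keys.Nodup :=
    pvCounts_nodup_keys schedules _ _ PySem.Dict.nodup_keys_empty
  rw [PySem.Set.mem_ofList, PySem.Dict.items_eq_map_keys _ hnd 0]
  simp only [List.mem_map, List.mem_filter, beq_iff_eq, pvCounts_getD, pvCounts_keys,
    PySem.Dict.getD_empty, PySem.Dict.keys_empty, List.not_mem_nil, false_or,
    PySem.List.mem_dedup, zero_add]
  constructor
  · rintro ⟨a, ⟨⟨k, ⟨⟨t0, ht0, -⟩, rfl⟩⟩, h2⟩, h1⟩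
    dsimp at h1 h2
    subst h1
    refine ⟨List.ne_nil_of_mem ht0, ?_⟩
    have hcnt : List.countP (fun t => decide (k ∈ pvOppSet schedules t)) (PySem.List.dedup teams)
        = (PySem.List.dedup teams).length := by exact_mod_cast h2
    have hall := List.countP_eq_length.mp hcnt
    intro t ht
    simpa using hall t ((PySem.List.mem_dedup _ _).mpr ht)
  · rintro ⟨hne, hall⟩
    obtain ⟨t0, ht0⟩ := List.exists_mem_of_ne_nil teams hne
    have hcnt : List.countP (fun t => decide (x ∈ pvOppSet schedules t)) (PySem.List.dedup teams)
        = (PySem.List.dedup teams).length := by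
      apply List.countP_eq_length.mpr
      intro t ht
      simpa using hall t ((PySem.List.mem_dedup _ _).mp ht)
    exact ⟨(x, ((PySem.List.dedup teams).length : Int)),
      ⟨⟨x, ⟨⟨t0, ht0, hall t0 ht0⟩, by rw [hcnt]⟩⟩, rfl⟩, rfl⟩

theorem get_common_games_eq_alt (schedules : List (String × List (List (String × String)))) (teams : List String) :
    get_common_games schedules teams = get_common_games_alt schedules teams := by
  cases teams with
  | nil => rfl
  | cons t0 ts =>
    have hc : ∀ y : String,
        PySem.Set.contains (List.foldl (fun s t => PySem.Set.inter s (pvOppSet schedules t)) (pvOppSet schedules t0) ts) y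
        = PySem.Set.contains (PySem.Set.ofList
            ((((PySem.List.dedup (t0 :: ts)).foldl (fun (d : PySem.Dict String Int) team =>
                (PySem.List.dedup ((pvLook schedules team []).map (fun g => pvOpp g team))).foldl
                  (fun d opp => d.insert opp (d.getD opp 0 + 1)) d) PySem.Dict.empty).items.filter
              (fun p => p.2 == ((PySem.List.dedup (t0 :: ts)).length : Int))).map (fun p => p.1))) y := by
      intro y
      apply Bool.coe_iff_coe.mp
      rw [PySem.Set.contains_iff, PySem.Set.contains_iff, pvMem_interFold, pvMem_common]
      simp
    unfold get_common_games get_common_games_alt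
    simp only [List.foldl_cons]
    rw [pvFoldA_some]
    simp only [hc]

-- ===== VERDICT (by name: the statement is the Claim_ definition above) =====
theorem get_common_games_spec : Claim_equal_get_common_games := by
  intro schedules teams _ _
  unfold Spec_get_common_games
  exact get_common_games_eq_alt schedules teams
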